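-- pv_equiv track=rewrite | github.com/SativusCrocus/mothersjoyapp | bot/scraper.py | _balanced_discovery_order
-- ===== SOURCE A (Python) =====
-- from collections import Counter, defaultdict, deque
--
-- def _balanced_discovery_order(posts: list[dict], group_order: list[str]) -> list[dict]:
--     """
--     Interleave posts across discovery groups and prefer videos within each group.
--
--     This improves source diversity without trying to infer anyone's identity from
--     the media itself. We diversify based on the explicit discovery tags we chose.
--     """
--     buckets: dict[str, dict[str, deque]] = defaultdict(lambda: {"video": deque(), "other": deque()})
--     seen_groups = set()
--
--     for post in posts:
--         group = post.get("discovery_group", "other")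
--         seen_groups.add(group)
--         bucket_key = "video" if post.get("media_type") == "video" else "other"
--         buckets[group][bucket_key].append(post)
--
--     ordered_groups = [group for group in group_order if group in seen_groups]
--     ordered_groups.extend(sorted(seen_groups - set(ordered_groups)))
--
--     ordered: list[dict] = []
--     while True:
--         added_any = False
--         for group in ordered_groups:
--             bucket = buckets[group]
--             queue = bucket["video"] if bucket["video"] else bucket["other"]
--             if not queue:
--                 continue
--             ordered.append(queue.popleft())
--             added_any = True
--         if not added_any:
--             break
--
--     return ordered
-- ===== SOURCE B (Python) =====
-- from collections import deque
--
--
-- def _balanced_discovery_order(posts: list[dict], group_order: list[str]) -> list[dict]: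
--     """
--     Same interleave without rescanning every group each round: one deque of
--     active group entries, exhausted entries dropped instead of re-checked.
--     """
--     buckets: dict[str, list] = {}
--     for post in posts:
--         g = post.get("discovery_group", "other")
--         pair = buckets.setdefault(g, [[], []])
--         pair[0 if post.get("media_type") == "video" else 1].append(post)
--
--     ordered_groups = [g for g in group_order if g in buckets]
--     ordered_groups += sorted(set(buckets) - set(ordered_groups))
--
--     streams = {g: deque(v + o) for g, (v, o) in buckets.items()}
--     ordered: list[dict] = []
--     active = deque(ordered_groups)
--     while active:
--         g = active.popleft()
--         queue = streams[g]
--         if queue: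
--             ordered.append(queue.popleft())
--             active.append(g)
--     return ordered
-- ===== Notes on version B (the rewrite author's own statement) =====
-- stated objective: alternative
-- what changed: A rescans the full ordered group list on every round of the while loop even after groups are exhausted; B keeps one deque of active group occurrences, emits the head of the popped group's videos-then-others stream and re-appends it, and drops exhausted occurrences for good.
import Mathlib
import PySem

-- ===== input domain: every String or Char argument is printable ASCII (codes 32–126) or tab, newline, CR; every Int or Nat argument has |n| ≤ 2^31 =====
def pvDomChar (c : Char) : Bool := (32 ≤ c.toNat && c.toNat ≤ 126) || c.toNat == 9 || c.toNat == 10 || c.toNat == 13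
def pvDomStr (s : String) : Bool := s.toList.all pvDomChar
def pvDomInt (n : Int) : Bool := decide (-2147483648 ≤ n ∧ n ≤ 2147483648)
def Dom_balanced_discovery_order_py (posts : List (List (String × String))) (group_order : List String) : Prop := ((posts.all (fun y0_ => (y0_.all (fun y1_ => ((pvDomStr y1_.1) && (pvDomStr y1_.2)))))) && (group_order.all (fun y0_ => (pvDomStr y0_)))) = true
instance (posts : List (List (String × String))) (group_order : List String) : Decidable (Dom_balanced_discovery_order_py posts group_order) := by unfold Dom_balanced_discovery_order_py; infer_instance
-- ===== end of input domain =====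

-- B replaces A's repeated rescan of every group on every round by a deque of active group
-- occurrences from which exhausted groups are dropped for good; objective: alternative.

-- shared field-access helpers (a Python dict post is an association list; get = first match)
def pvGroup (post : List (String × String)) : String :=
  (PySem.Dict.mk post).getD "discovery_group" "other"

def pvIsVideo (post : List (String × String)) : Bool :=
  (PySem.Dict.mk post).get? "media_type" == some "video"

-- ===== PORT A =====
-- buckets[group] is a dict with the two fixed keys "video"/"other": ported as a pair
-- (videos, others); the defaultdict access + deque append becomes getD + insert.
def pvBucketAddA (bk : PySem.Dict String (List (List (String × String)) × List (List (String × String))))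
    (post : List (String × String)) :
    PySem.Dict String (List (List (String × String)) × List (List (String × String))) :=
  let g := pvGroup post
  let b := bk.getD g ([], [])
  if pvIsVideo post then bk.insert g (b.1 ++ [post], b.2) else bk.insert g (b.1, b.2 ++ [post])

-- ordered_groups = [g for g in group_order if g in seen] + sorted(seen - set(ordered_groups))
def pvOrderedGroupsA (group_order : List String) (seen : PySem.Set String) : List String :=
  let og := group_order.filter (fun g => PySem.Set.contains seen g)
  og ++ PySem.List.sorted (PySem.Set.diff seen (PySem.Set.ofList og)) (fun x => x)

-- one pass of the for-loop over ordered_groups; state = (ordered, buckets, added_any)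
def pvRoundA (groups : List String)
    (st : PySem.Dict String (List (List (String × String)) × List (List (String × String)))) :
    List (List (String × String)) ×
      PySem.Dict String (List (List (String × String)) × List (List (String × String))) × Bool :=
  groups.foldl (fun acc g =>
    let bucket := acc.2.1.getD g ([], [])
    match bucket.1, bucket.2 with
    | [], [] => acc
    | x :: vs, o => (acc.1 ++ [x], acc.2.1.insert g (vs, o), true)
    | [], y :: os => (acc.1 ++ [y], acc.2.1.insert g ([], os), true))
    ([], st, false)

-- the while-True loop; every iteration that adds pops ≥ 1 post, so posts.length + 1
-- iterations of fuel are exact (the last iteration is the added_any = False one)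
def pvWhileA (fuel : Nat) (groups : List String)
    (st : PySem.Dict String (List (List (String × String)) × List (List (String × String)))) :
    List (List (String × String)) :=
  match fuel with
  | 0 => []
  | fuel + 1 =>
      let r := pvRoundA groups st
      r.1 ++ (if r.2.2 then pvWhileA fuel groups r.2.1 else [])

def balanced_discovery_order_py (posts : List (List (String × String))) (group_order : List String) :
    List (List (String × String)) :=
  let bs := posts.foldl
    (fun st post => (pvBucketAddA st.1 post, PySem.Set.add st.2 (pvGroup post)))
    (PySem.Dict.mk [], ([] : PySem.Set String))
  pvWhileA (posts.length + 1) (pvOrderedGroupsA group_order bs.2) bs.1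

-- ===== PORT B =====
-- buckets.setdefault(g, [[], []]) + in-place append = getD then insert of the grown pair
def pvEntryB (bk : PySem.Dict String (List (List (String × String)) × List (List (String × String))))
    (post : List (String × String)) :
    List (List (String × String)) × List (List (String × String)) :=
  let b := bk.getD (pvGroup post) ([], [])
  if pvIsVideo post then (b.1 ++ [post], b.2) else (b.1, b.2 ++ [post])

def pvBucketsB (posts : List (List (String × String))) :
    PySem.Dict String (List (List (String × String)) × List (List (String × String))) :=
  posts.foldl (fun bk post => bk.insert (pvGroup post) (pvEntryB bk post)) (PySem.Dict.mk [])

-- streams = {g: deque(v + o) for g, (v, o) in buckets.items()}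
def pvStreamsOf (bk : PySem.Dict String (List (List (String × String)) × List (List (String × String)))) :
    PySem.Dict String (List (List (String × String))) :=
  PySem.Dict.mk (bk.items.map (fun kv => (kv.1, kv.2.1 ++ kv.2.2)))

-- the 'while active' loop: pop an occurrence, emit its stream's head and re-append it, or drop it.
-- Each step either emits a post or drops an occurrence for good, so posts + occurrences + 1 fuel
-- is exact (streams[g] as getD is total; every active g is a buckets key, so no KeyError arises).
def pvLoopB (fuel : Nat) (streams : PySem.Dict String (List (List (String × String))))
    (active : List String) (out : List (List (String × String))) : List (List (String × String)) :=
  match fuel with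
  | 0 => out
  | fuel + 1 =>
      match active with
      | [] => out
      | g :: rest =>
          match streams.getD g [] with
          | [] => pvLoopB fuel streams rest out
          | p :: ps => pvLoopB fuel (streams.insert g ps) (rest ++ [g]) (out ++ [p])

def balanced_discovery_order_py_alt (posts : List (List (String × String))) (group_order : List String) :
    List (List (String × String)) :=
  let buckets := pvBucketsB posts
  let in_order := group_order.filter (fun g => buckets.contains g)
  let og := in_order ++ PySem.List.sorted
    (PySem.Set.diff (PySem.Set.ofList buckets.keys) (PySem.Set.ofList in_order)) (fun x => x)
  pvLoopB (posts.length + og.length + 1) (pvStreamsOf buckets) og []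

-- ===== PRECONDITION & SPEC =====
def Spec_balanced_discovery_order_py (posts : List (List (String × String))) (group_order : List String) (out : List (List (String × String))) : Prop := out = balanced_discovery_order_py_alt posts group_order
instance (posts : List (List (String × String))) (group_order : List String) (out : List (List (String × String))) : Decidable (Spec_balanced_discovery_order_py posts group_order out) := by unfold Spec_balanced_discovery_order_py; infer_instance

-- ===== CLAIM (what is proved, stated in full; the proofs are below) =====
def Claim_equal_balanced_discovery_order_py : Prop := ∀ (posts : List (List (String × String))) (group_order : List String), Dom_balanced_discovery_order_py posts group_order → Spec_balanced_discovery_order_py posts group_order (balanced_discovery_order_py posts group_order)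

-- ===== LEMMAS AND PROOFS =====

abbrev PvPost := List (String × String)
abbrev PvBk := PySem.Dict String (List PvPost × List PvPost)
abbrev PvSt := PySem.Dict String (List PvPost)

-- abstract round: process the occurrence list once, popping the head of each nonempty stream;
-- returns (emitted, final streams, surviving occurrences)
def pvRound : PvSt → List String → List PvPost × PvSt × List String
  | st, [] => ([], st, [])
  | st, g :: rest =>
      match st.getD g [] with
      | [] => pvRound st rest
      | p :: ps =>
          let r := pvRound (st.insert g ps) rest
          (p :: r.1, r.2.1, g :: r.2.2)

-- round-structured semantics shared by both ports
def pvRoundsC : Nat → PvSt → List String → List PvPost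
  | 0, _, _ => []
  | f + 1, st, act =>
      let r := pvRound st act
      r.1 ++ (if r.2.2.isEmpty then [] else pvRoundsC f r.2.1 r.2.2)

-- A's pair-bucket state simulates B's concatenated-stream state
def pvSim (stA : PvBk) (stB : PvSt) : Prop :=
  ∀ g, (stA.getD g ([], [])).1 ++ (stA.getD g ([], [])).2 = stB.getD g []

-- "act is gs with some occurrences of empty-stream groups removed"
inductive pvRel (st : PvSt) : List String → List String → Prop
  | nil : pvRel st [] []
  | keep (g : String) (gs act : List String) : pvRel st gs act → pvRel st (g :: gs) (g :: act)
  | drop (g : String) (gs act : List String) :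
      st.getD g [] = [] → pvRel st gs act → pvRel st (g :: gs) act

-- measures
def pvD (st : PvSt) (act : List String) : Nat :=
  ((PySem.List.dedup act).map (fun g => (st.getD g []).length)).sum

def pvM (st : PvSt) (act : List String) : Nat :=
  (act.map (fun g => (st.getD g []).length)).foldr max 0

lemma pvRel_refl (st : PvSt) (l : List String) : pvRel st l l := by
  induction l with
  | nil => exact pvRel.nil
  | cons g t ih => exact pvRel.keep g t t ih

lemma pvRel_mono (st st' : PvSt) (gs act : List String)
    (hm : ∀ g, st.getD g [] = [] → st'.getD g [] = [])
    (h : pvRel st gs act) : pvRel st' gs act := by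
  induction h with
  | nil => exact pvRel.nil
  | keep g gs act _ ih => exact pvRel.keep g gs act ih
  | drop g gs act he _ ih => exact pvRel.drop g gs act (hm g he) ih

lemma pvRel_trans (st : PvSt) (gs act sv : List String)
    (h1 : pvRel st gs act) (h2 : pvRel st act sv) : pvRel st gs sv := by
  induction h1 generalizing sv with
  | nil => cases h2; exact pvRel.nil
  | keep g gs act _ ih =>
      cases h2 with
      | keep _ _ sv' h' => exact pvRel.keep g gs sv' (ih sv' h')
      | drop _ _ _ he h' => exact pvRel.drop g gs sv he (ih sv h')
  | drop g gs act he _ ih => exact pvRel.drop g gs sv he (ih sv h2)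

lemma pvRound_len_le (st : PvSt) (act : List String) (g : String) :
    ((pvRound st act).2.1.getD g []).length ≤ (st.getD g []).length := by
  induction act generalizing st with
  | nil => simp [pvRound]
  | cons h rest ih =>
      cases hb : st.getD h [] with
      | nil => simp only [pvRound, hb]; exact ih st
      | cons p ps =>
          simp only [pvRound, hb]
          refine le_trans (ih (st.insert h ps)) ?_
          rw [PySem.Dict.getD_insert]
          by_cases hg : g = h
          · subst hg; simp [hb]
          · simp [hg]

lemma pvRound_empty_stays (st : PvSt) (act : List String) (g : String)
    (h : st.getD g [] = []) : (pvRound st act).2.1.getD g [] = [] := by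
  have h1 := pvRound_len_le st act g
  rw [h] at h1
  exact List.eq_nil_of_length_eq_zero (Nat.le_zero.mp (by simpa using h1))

lemma pvRel_round_eq (st : PvSt) (gs act : List String) (h : pvRel st gs act) :
    pvRound st gs = pvRound st act := by
  induction gs generalizing st act with
  | nil => cases h; rfl
  | cons g gs' ih =>
      cases h with
      | keep _ _ act' h' =>
          cases hb : st.getD g [] with
          | nil => simp only [pvRound, hb]; exact ih st act' h'
          | cons p ps =>
              have hrel' : pvRel (st.insert g ps) gs' act' := by
                refine pvRel_mono st _ _ _ ?_ h'
                intro g' hg'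
                rw [PySem.Dict.getD_insert]
                by_cases hgg : g' = g
                · subst hgg; rw [hb] at hg'; cases hg'
                · simp [hgg, hg']
              simp only [pvRound, hb]
              rw [ih (st.insert g ps) act' hrel']
      | drop _ _ _ he h' =>
          simp only [pvRound, he]
          exact ih st act h'

lemma pvRound_survivors_rel (st : PvSt) (act : List String) :
    pvRel (pvRound st act).2.1 act (pvRound st act).2.2 := by
  induction act generalizing st with
  | nil => exact pvRel.nil
  | cons g rest ih =>
      cases hb : st.getD g [] with
      | nil =>
          simp only [pvRound, hb]
          exact pvRel.drop g rest _ (pvRound_empty_stays st rest g hb) (ih st)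
      | cons p ps =>
          simp only [pvRound, hb]
          exact pvRel.keep g rest _ (ih (st.insert g ps))

lemma pvRound_emitted_len (st : PvSt) (act : List String) :
    (pvRound st act).1.length = (pvRound st act).2.2.length := by
  induction act generalizing st with
  | nil => rfl
  | cons g rest ih =>
      cases hb : st.getD g [] with
      | nil => simp only [pvRound, hb]; exact ih st
      | cons p ps => simp only [pvRound, hb, List.length_cons]; rw [ih (st.insert g ps)]

lemma pvRound_sv_sublist (st : PvSt) (act : List String) :
    List.Sublist (pvRound st act).2.2 act := by
  induction act generalizing st with
  | nil => simp [pvRound]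
  | cons g rest ih =>
      cases hb : st.getD g [] with
      | nil => simp only [pvRound, hb]; exact (ih st).cons g
      | cons p ps => simp only [pvRound, hb]; exact (ih (st.insert g ps)).cons₂ g

lemma pvRound_sv_lt (st : PvSt) (act : List String) (g : String)
    (hg : g ∈ (pvRound st act).2.2) :
    ((pvRound st act).2.1.getD g []).length < (st.getD g []).length := by
  induction act generalizing st with
  | nil => simp [pvRound] at hg
  | cons h rest ih =>
      cases hb : st.getD h [] with
      | nil => simp only [pvRound, hb] at hg ⊢; exact ih st hg
      | cons p ps =>
          simp only [pvRound, hb] at hg ⊢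
          rcases List.mem_cons.mp hg with rfl | hg'
          · have h1 := pvRound_len_le (st.insert g ps) rest g
            simp at h1
            rw [hb]
            simp only [List.length_cons]
            omega
          · have h1 := ih (st.insert h ps) hg'
            refine lt_of_lt_of_le h1 ?_
            rw [PySem.Dict.getD_insert]
            by_cases hgg : g = h
            · subst hgg; simp [hb]
            · simp [hgg]

-- nodup-sum bookkeeping helpers
lemma pv_sum_update (L : List String) (f f' : String → Nat) (g : String)
    (hnd : L.Nodup) (hg : g ∈ L)
    (hne : ∀ h ∈ L, h ≠ g → f' h = f h) (hgv : f' g + 1 = f g) :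
    (L.map f').sum + 1 = (L.map f).sum := by
  induction L with
  | nil => cases hg
  | cons h t ih =>
      rcases List.mem_cons.mp hg with rfl | hgt
      · have htail : t.map f' = t.map f := by
          apply List.map_congr_left
          intro x hx
          exact hne x (List.mem_cons_of_mem _ hx) (fun hxg => (List.nodup_cons.mp hnd).1 (hxg ▸ hx))
        simp only [List.map_cons, List.sum_cons, htail]
        omega
      · have hh : f' h = f h := by
          refine hne h List.mem_cons_self (fun hhg => ?_)
          exact (List.nodup_cons.mp hnd).1 (hhg ▸ hgt)
        have := ih (List.nodup_cons.mp hnd).2 hgt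
          (fun x hx hxg => hne x (List.mem_cons_of_mem _ hx) hxg)
        simp only [List.map_cons, List.sum_cons, hh]
        omega

lemma pv_sum_bounded (L : List String) (f f' : String → Nat) (g : String)
    (hnd : L.Nodup) (hne : ∀ h, h ≠ g → f' h = f h) (hgv : f' g ≤ f g + 1) :
    (L.map f').sum ≤ (L.map f).sum + 1 := by
  induction L with
  | nil => simp
  | cons h t ih =>
      by_cases hh : h = g
      · subst hh
        have htail : t.map f' = t.map f := by
          apply List.map_congr_left
          intro x hx
          exact hne x (fun hxg => (List.nodup_cons.mp hnd).1 (hxg ▸ hx))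
        simp only [List.map_cons, List.sum_cons, htail]
        omega
      · have := ih (List.nodup_cons.mp hnd).2
        simp only [List.map_cons, List.sum_cons, hne h hh]
        omega

-- total content over any nodup cover: one round removes exactly the emitted posts
lemma pvRound_sum (st : PvSt) (act : List String) (L : List String)
    (hnd : L.Nodup) (hcov : ∀ g ∈ act, g ∈ L) :
    (L.map (fun g => ((pvRound st act).2.1.getD g []).length)).sum + (pvRound st act).1.length
      = (L.map (fun g => (st.getD g []).length)).sum := by
  induction act generalizing st with
  | nil => simp [pvRound]
  | cons g rest ih =>
      cases hb : st.getD g [] with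
      | nil =>
          simp only [pvRound, hb]
          exact ih st (fun g' hg' => hcov g' (List.mem_cons_of_mem _ hg'))
      | cons p ps =>
          simp only [pvRound, hb, List.length_cons]
          have h1 := ih (st.insert g ps) (fun g' hg' => hcov g' (List.mem_cons_of_mem _ hg'))
          have h2 : (L.map (fun h => ((st.insert g ps).getD h []).length)).sum + 1
              = (L.map (fun h => (st.getD h []).length)).sum := by
            refine pv_sum_update L _ _ g hnd (hcov g List.mem_cons_self) ?_ ?_
            · intro h _ hhg
              rw [PySem.Dict.getD_insert]
              simp [hhg]
            · rw [PySem.Dict.getD_insert]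
              simp [hb]
          omega

-- sublist sums of nonnegative values
lemma pv_sublist_sum_le (l₁ l₂ : List String) (f : String → Nat) (h : List.Subperm l₁ l₂) :
    (l₁.map f).sum ≤ (l₂.map f).sum := by
  obtain ⟨l, hperm, hsub⟩ := h
  calc (l₁.map f).sum = (l.map f).sum := ((hperm.map f).sum_eq).symm
    _ ≤ (l₂.map f).sum := (hsub.map f).sum_le_sum (by simp)

lemma pvD_round_step (st : PvSt) (act : List String) :
    pvD (pvRound st act).2.1 (pvRound st act).2.2 + (pvRound st act).2.2.length
      ≤ pvD st act := by
  have hnd : (PySem.List.dedup act).Nodup := PySem.List.nodup_dedup act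
  have hcov : ∀ g ∈ act, g ∈ PySem.List.dedup act := fun g hg => by
    simpa [PySem.List.mem_dedup] using hg
  have hsum := pvRound_sum st act (PySem.List.dedup act) hnd hcov
  have hsubp : List.Subperm (PySem.List.dedup (pvRound st act).2.2) (PySem.List.dedup act) := by
    refine List.Nodup.subperm (PySem.List.nodup_dedup _) ?_
    intro g hg
    refine hcov g ((pvRound_sv_sublist st act).subset ?_)
    simpa [PySem.List.mem_dedup] using hg
  have hle := pv_sublist_sum_le _ _ (fun g => ((pvRound st act).2.1.getD g []).length) hsubp
  have hel := pvRound_emitted_len st act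
  unfold pvD
  omega

-- max-stream-length measure
lemma pvM_elem_le (st : PvSt) (act : List String) (g : String) (hg : g ∈ act) :
    (st.getD g []).length ≤ pvM st act := by
  induction act with
  | nil => cases hg
  | cons h t ih =>
      simp only [pvM, List.map_cons, List.foldr_cons] at *
      rcases List.mem_cons.mp hg with rfl | hgt
      · omega
      · have := ih hgt; omega

lemma pvM_lt_of_forall (act : List String) (f : String → Nat) (c : Nat)
    (hc : 0 < c) (h : ∀ g ∈ act, f g < c) : (act.map f).foldr max 0 < c := by
  induction act with
  | nil => simpa using hc
  | cons g t ih =>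
      simp only [List.map_cons, List.foldr_cons]
      have h1 := h g List.mem_cons_self
      have h2 := ih (fun x hx => h x (List.mem_cons_of_mem _ hx))
      omega

lemma pvM_round_step (st : PvSt) (act : List String)
    (hne : (pvRound st act).2.2 ≠ []) :
    pvM (pvRound st act).2.1 (pvRound st act).2.2 < pvM st act := by
  have hpos : 0 < pvM st act := by
    obtain ⟨g, hg⟩ := List.exists_mem_of_ne_nil _ hne
    have h1 := pvRound_sv_lt st act g hg
    have h2 := pvM_elem_le st act g ((pvRound_sv_sublist st act).subset hg)
    omega
  refine pvM_lt_of_forall _ _ _ hpos ?_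
  intro g hg
  have h1 := pvRound_sv_lt st act g hg
  have h2 := pvM_elem_le st act g ((pvRound_sv_sublist st act).subset hg)
  omega

lemma pvM_le_of_forall (st : PvSt) (act : List String) (c : Nat)
    (h : ∀ g ∈ act, (st.getD g []).length ≤ c) : pvM st act ≤ c := by
  induction act with
  | nil => simp [pvM]
  | cons g t ih =>
      simp only [pvM, List.map_cons, List.foldr_cons] at *
      have h1 := h g List.mem_cons_self
      have h2 := ih (fun x hx => h x (List.mem_cons_of_mem _ hx))
      omega

-- ===== A side: pvWhileA equals pvRoundsC =====
-- the body of A's inner for-loop, named so the proofs can speak about it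
def pvStepA (acc : List PvPost × PvBk × Bool) (g : String) : List PvPost × PvBk × Bool :=
  let bucket := acc.2.1.getD g ([], [])
  match bucket.1, bucket.2 with
  | [], [] => acc
  | x :: vs, o => (acc.1 ++ [x], acc.2.1.insert g (vs, o), true)
  | [], y :: os => (acc.1 ++ [y], acc.2.1.insert g ([], os), true)

lemma pvRoundA_eq_foldl (gs : List String) (st : PvBk) :
    pvRoundA gs st = gs.foldl pvStepA ([], st, false) := by
  unfold pvRoundA
  congr 1

lemma pv_roundA_sim (gs : List String) (stA : PvBk) (stB : PvSt) (acc : List PvPost) (added : Bool)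
    (hsim : pvSim stA stB) :
    (gs.foldl pvStepA (acc, stA, added)).1 = acc ++ (pvRound stB gs).1
  ∧ pvSim (gs.foldl pvStepA (acc, stA, added)).2.1 (pvRound stB gs).2.1
  ∧ (gs.foldl pvStepA (acc, stA, added)).2.2 = (added || !(pvRound stB gs).2.2.isEmpty) := by
  induction gs generalizing stA stB acc added with
  | nil => simp [pvRound, hsim]
  | cons g rest ih =>
      obtain ⟨v, o, hb⟩ : ∃ v o, stA.getD g ([], []) = (v, o) := ⟨_, _, rfl⟩
      have hcat : v ++ o = stB.getD g [] := by have := hsim g; rwa [hb] at this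
      rcases v with _ | ⟨x, vs⟩
      · rcases o with _ | ⟨y, os⟩
        · have hBempty : stB.getD g [] = [] := by simpa using hcat.symm
          have hstep : pvStepA (acc, stA, added) g = (acc, stA, added) := by
            simp [pvStepA, hb]
          rw [List.foldl_cons, hstep]
          simp only [pvRound, hBempty]
          exact ih stA stB acc added hsim
        · have hBg : stB.getD g [] = y :: os := by simpa using hcat.symm
          have hsim' : pvSim (stA.insert g ([], os)) (stB.insert g os) := by
            intro g'
            rw [PySem.Dict.getD_insert, PySem.Dict.getD_insert]
            by_cases hgg : g' = g
            · simp [hgg]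
            · simp [hgg, hsim g']
          have hstep : pvStepA (acc, stA, added) g = (acc ++ [y], stA.insert g ([], os), true) := by
            simp [pvStepA, hb]
          rw [List.foldl_cons, hstep]
          simp only [pvRound, hBg]
          obtain ⟨ih1, ih2, ih3⟩ := ih (stA.insert g ([], os)) (stB.insert g os) (acc ++ [y]) true hsim'
          refine ⟨by rw [ih1]; simp, ih2, by rw [ih3]; simp⟩
      · have hBg : stB.getD g [] = x :: (vs ++ o) := by simpa using hcat.symm
        have hsim' : pvSim (stA.insert g (vs, o)) (stB.insert g (vs ++ o)) := by
          intro g'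
          rw [PySem.Dict.getD_insert, PySem.Dict.getD_insert]
          by_cases hgg : g' = g
          · simp [hgg]
          · simp [hgg, hsim g']
        have hstep : pvStepA (acc, stA, added) g = (acc ++ [x], stA.insert g (vs, o), true) := by
          simp [pvStepA, hb]
        rw [List.foldl_cons, hstep]
        simp only [pvRound, hBg]
        obtain ⟨ih1, ih2, ih3⟩ := ih (stA.insert g (vs, o)) (stB.insert g (vs ++ o)) (acc ++ [x]) true hsim'
        refine ⟨by rw [ih1]; simp, ih2, by rw [ih3]; simp⟩

lemma pv_whileA_roundsC (f : Nat) (gs act : List String) (stA : PvBk) (stB : PvSt)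
    (hsim : pvSim stA stB) (hrel : pvRel stB gs act) :
    pvWhileA f gs stA = pvRoundsC f stB act := by
  induction f generalizing stA stB act with
  | zero => rfl
  | succ s ih =>
      have hrg := pvRel_round_eq stB gs act hrel
      obtain ⟨h1, h2, h3⟩ := pv_roundA_sim gs stA stB [] false hsim
      have hshow : pvWhileA (s + 1) gs stA
          = (pvRoundA gs stA).1 ++ (if (pvRoundA gs stA).2.2 then pvWhileA s gs (pvRoundA gs stA).2.1 else []) := rfl
      rw [hshow, pvRoundA_eq_foldl, h1, h3]
      simp only [pvRoundsC, hrg, List.nil_append, Bool.false_or]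
      by_cases hsv : (pvRound stB act).2.2.isEmpty
      · simp [hsv]
      · simp only [hsv, Bool.not_false, if_true]
        congr 1
        have hrel2 : pvRel (pvRound stB act).2.1 gs (pvRound stB act).2.2 := by
          refine pvRel_trans _ gs act _ ?_ (pvRound_survivors_rel stB act)
          refine pvRel_mono stB _ gs act ?_ hrel
          intro g hg
          exact pvRound_empty_stays stB act g hg
        have h2' : pvSim (gs.foldl pvStepA ([], stA, false)).2.1 (pvRound stB act).2.1 := by
          rw [← hrg]; exact h2
        exact ih _ _ _ h2' hrel2

-- ===== B side: pvLoopB equals pvRoundsC =====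
lemma pvLoopB_nil (f : Nat) (st : PvSt) (out : List PvPost) :
    pvLoopB f st [] out = out := by
  cases f <;> rfl

lemma pvLoopB_prefix (f : Nat) (st : PvSt) (act : List String) (out : List PvPost) :
    pvLoopB f st act out = out ++ pvLoopB f st act [] := by
  induction f generalizing st act out with
  | zero => simp [pvLoopB]
  | succ s ih =>
      cases act with
      | nil => simp [pvLoopB]
      | cons g rest =>
          cases hb : st.getD g [] with
          | nil => simp only [pvLoopB, hb]; rw [ih, ih st rest []]
          | cons p ps =>
              simp only [pvLoopB, hb]
              rw [ih (st.insert g ps) (rest ++ [g]) (out ++ [p]),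
                  ih (st.insert g ps) (rest ++ [g]) ([] ++ [p])]
              simp

lemma pvLoopB_round (act pending : List String) (st : PvSt) (out : List PvPost) (f : Nat) :
    pvLoopB (act.length + f) st (act ++ pending) out
      = pvLoopB f (pvRound st act).2.1 (pending ++ (pvRound st act).2.2) (out ++ (pvRound st act).1) := by
  induction act generalizing st pending out with
  | nil => simp [pvRound]
  | cons g rest ih =>
      cases hb : st.getD g [] with
      | nil =>
          have hl : (g :: rest).length + f = (rest.length + f) + 1 := by simp; omega
          rw [hl]
          simp only [pvLoopB, List.cons_append, hb]
          simp only [pvRound, hb]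
          exact ih pending st out
      | cons p ps =>
          have hl : (g :: rest).length + f = (rest.length + f) + 1 := by simp; omega
          rw [hl]
          simp only [pvLoopB, List.cons_append, hb]
          simp only [pvRound, hb]
          have harr : rest ++ pending ++ [g] = rest ++ (pending ++ [g]) := by simp
          rw [harr, ih (pending ++ [g]) (st.insert g ps) (out ++ [p])]
          simp

lemma pvLoopB_roundsC (fC F : Nat) (st : PvSt) (act : List String)
    (hF : pvD st act + act.length < F) (hC : pvM st act < fC) :
    pvLoopB F st act [] = pvRoundsC fC st act := by
  induction fC generalizing F st act with
  | zero => omega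
  | succ f ih =>
      obtain ⟨F', hF'⟩ : ∃ F', F = act.length + F' := ⟨F - act.length, by omega⟩
      subst hF'
      have hstep := pvLoopB_round act [] st [] F'
      rw [List.append_nil] at hstep
      rw [hstep]
      simp only [List.nil_append]
      rw [pvLoopB_prefix]
      simp only [pvRoundsC]
      by_cases hsv : (pvRound st act).2.2.isEmpty
      · have hemp : (pvRound st act).2.2 = [] := by simpa [List.isEmpty_iff] using hsv
        rw [if_pos hsv, hemp, pvLoopB_nil]
      · have hne : (pvRound st act).2.2 ≠ [] := by simpa [List.isEmpty_iff] using hsv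
        rw [if_neg hsv]
        congr 1
        have hD := pvD_round_step st act
        have hM := pvM_round_step st act hne
        have hlen : (pvRound st act).2.2.length ≤ act.length :=
          (pvRound_sv_sublist st act).length_le
        exact ih F' _ _ (by omega) (by omega)

-- ===== assembling the two ports =====
lemma pv_pair_fold (posts : List PvPost) (bk : PvBk) (s : PySem.Set String) :
    posts.foldl (fun st post => (pvBucketAddA st.1 post, PySem.Set.add st.2 (pvGroup post))) (bk, s)
      = (posts.foldl (fun bk post => pvBucketAddA bk post) bk,
         posts.foldl (fun s post => PySem.Set.add s (pvGroup post)) s) := by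
  induction posts generalizing bk s with
  | nil => rfl
  | cons p rest ih => simpa using ih (pvBucketAddA bk p) (PySem.Set.add s (pvGroup p))

lemma pv_bucketAdd_eq (bk : PvBk) (post : PvPost) :
    pvBucketAddA bk post = bk.insert (pvGroup post) (pvEntryB bk post) := by
  cases h : pvIsVideo post <;> simp [pvBucketAddA, pvEntryB, h]

lemma pv_bucketsA_eq (posts : List PvPost) :
    posts.foldl (fun bk post => pvBucketAddA bk post) (PySem.Dict.mk []) = pvBucketsB posts := by
  unfold pvBucketsB
  have h : (fun (bk : PvBk) post => pvBucketAddA bk post)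
      = (fun bk post => bk.insert (pvGroup post) (pvEntryB bk post)) := by
    funext bk post; exact pv_bucketAdd_eq bk post
  rw [h]

lemma pv_seen_eq (posts : List PvPost) :
    posts.foldl (fun s post => PySem.Set.add s (pvGroup post)) ([] : PySem.Set String)
      = PySem.Set.ofList (posts.map pvGroup) := by
  rw [PySem.Set.ofList_eq_foldl, List.foldl_map]

lemma pv_keysB (posts : List PvPost) :
    (pvBucketsB posts).keys = PySem.Set.ofList (posts.map pvGroup) := by
  unfold pvBucketsB
  rw [PySem.Dict.keys_foldl_insert_key posts pvGroup (fun d x => pvEntryB d x)]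
  rw [PySem.Set.ofList_eq_foldl]
  rfl

-- streams dict lookup = mapped bucket lookup
lemma pv_mk_items {ν : Type} [BEq String] (d : PySem.Dict String ν) : PySem.Dict.mk d.items = d := rfl

lemma pv_get?_cat (l : List (String × (List PvPost × List PvPost))) (g : String) :
    (PySem.Dict.mk (l.map (fun kv => (kv.1, kv.2.1 ++ kv.2.2)))).get? g
      = ((PySem.Dict.mk l).get? g).map (fun v => v.1 ++ v.2) := by
  induction l with
  | nil => rfl
  | cons kv rest ih =>
      obtain ⟨k, v⟩ := kv
      simp only [List.map_cons, PySem.Dict.get?_mk_cons]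
      by_cases h : k == g
      · simp [h]
      · simp only [h, Bool.false_eq_true, if_false]; exact ih

lemma pv_sim_streamsOf (bk : PvBk) : pvSim bk (pvStreamsOf bk) := by
  intro g
  unfold pvStreamsOf
  rw [PySem.Dict.getD_eq_get?_getD, PySem.Dict.getD_eq_get?_getD, pv_get?_cat, pv_mk_items]
  cases bk.get? g with
  | none => rfl
  | some v => rfl

-- per-group total content bound for the D and M measures
lemma pv_fold_len_le_general (posts : List PvPost) (bk : PvBk) (L : List String) (hnd : L.Nodup) :
    (L.map (fun g =>
        ((posts.foldl (fun bk post => bk.insert (pvGroup post) (pvEntryB bk post)) bk).getD g ([], [])).1.length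
          + ((posts.foldl (fun bk post => bk.insert (pvGroup post) (pvEntryB bk post)) bk).getD g ([], [])).2.length)).sum
      ≤ (L.map (fun g => (bk.getD g ([], [])).1.length + (bk.getD g ([], [])).2.length)).sum + posts.length := by
  induction posts generalizing bk with
  | nil => simp
  | cons p rest ih =>
      simp only [List.foldl_cons, List.length_cons]
      have h1 := ih (bk.insert (pvGroup p) (pvEntryB bk p))
      have h2 : (L.map (fun g =>
          ((bk.insert (pvGroup p) (pvEntryB bk p)).getD g ([], [])).1.length
            + ((bk.insert (pvGroup p) (pvEntryB bk p)).getD g ([], [])).2.length)).sum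
          ≤ (L.map (fun g => (bk.getD g ([], [])).1.length + (bk.getD g ([], [])).2.length)).sum + 1 := by
        refine pv_sum_bounded L _ _ (pvGroup p) hnd ?_ ?_
        · intro h hh
          rw [PySem.Dict.getD_insert]
          simp [hh]
        · rw [PySem.Dict.getD_insert]
          unfold pvEntryB
          by_cases hv : pvIsVideo p <;> simp [hv] <;> omega
      omega

lemma pv_sumL_le (posts : List PvPost) (L : List String) (hnd : L.Nodup) :
    (L.map (fun g => ((pvBucketsB posts).getD g ([], [])).1.length
        + ((pvBucketsB posts).getD g ([], [])).2.length)).sum ≤ posts.length := by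
  have h := pv_fold_len_le_general posts (PySem.Dict.mk []) L hnd
  have hz : (L.map (fun g =>
      ((PySem.Dict.mk ([] : List (String × (List PvPost × List PvPost)))).getD g ([], [])).1.length
        + ((PySem.Dict.mk ([] : List (String × (List PvPost × List PvPost)))).getD g ([], [])).2.length)).sum = 0 := by
    apply List.sum_eq_zero
    intro x hx
    obtain ⟨gq, _, rfl⟩ := List.mem_map.mp hx
    rfl
  rw [hz, Nat.zero_add] at h
  unfold pvBucketsB
  exact h

lemma pv_stream_len_le (posts : List PvPost) (g : String) :
    ((pvBucketsB posts).getD g ([], [])).1.length + ((pvBucketsB posts).getD g ([], [])).2.length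
      ≤ posts.length := by
  have h := pv_sumL_le posts [g] (List.nodup_singleton g)
  simpa using h

lemma pv_streams_len_le (posts : List PvPost) (g : String) :
    ((pvStreamsOf (pvBucketsB posts)).getD g []).length ≤ posts.length := by
  have hs := pv_sim_streamsOf (pvBucketsB posts) g
  rw [← hs, List.length_append]
  exact pv_stream_len_le posts g

lemma pvM_init_le (posts : List PvPost) (act : List String) :
    pvM (pvStreamsOf (pvBucketsB posts)) act ≤ posts.length :=
  pvM_le_of_forall _ _ _ (fun g _ => pv_streams_len_le posts g)

lemma pvD_init_le (posts : List PvPost) (act : List String) :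
    pvD (pvStreamsOf (pvBucketsB posts)) act ≤ posts.length := by
  unfold pvD
  have h1 : ((PySem.List.dedup act).map (fun g => ((pvStreamsOf (pvBucketsB posts)).getD g []).length)).sum
      = ((PySem.List.dedup act).map (fun g =>
          ((pvBucketsB posts).getD g ([], [])).1.length + ((pvBucketsB posts).getD g ([], [])).2.length)).sum := by
    apply congrArg
    apply List.map_congr_left
    intro g _
    have hs := pv_sim_streamsOf (pvBucketsB posts) g
    rw [← hs, List.length_append]
  rw [h1]
  exact pv_sumL_le posts (PySem.List.dedup act) (PySem.List.nodup_dedup act)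

-- ===== VERDICT (by name: the statement is the Claim_ definition above) =====
theorem balanced_discovery_order_py_spec : Claim_equal_balanced_discovery_order_py := by
  intro posts group_order _
  unfold Spec_balanced_discovery_order_py
  have hA : balanced_discovery_order_py posts group_order
      = pvWhileA (posts.length + 1)
          (pvOrderedGroupsA group_order (PySem.Set.ofList (posts.map pvGroup))) (pvBucketsB posts) := by
    show pvWhileA (posts.length + 1)
        (pvOrderedGroupsA group_order
          (posts.foldl (fun st post => (pvBucketAddA st.1 post, PySem.Set.add st.2 (pvGroup post)))
            (PySem.Dict.mk [], ([] : PySem.Set String))).2)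
        (posts.foldl (fun st post => (pvBucketAddA st.1 post, PySem.Set.add st.2 (pvGroup post)))
            (PySem.Dict.mk [], ([] : PySem.Set String))).1
      = _
    rw [pv_pair_fold, pv_bucketsA_eq, pv_seen_eq]
  have hcon : ∀ g, PySem.Set.contains (PySem.Set.ofList (posts.map pvGroup)) g
      = (pvBucketsB posts).contains g := by
    intro g
    rw [PySem.Dict.contains_eq_decide_mem_keys, pv_keysB]
    simp [PySem.Set.contains]
  have hfil : group_order.filter (fun g => PySem.Set.contains (PySem.Set.ofList (posts.map pvGroup)) g)
      = group_order.filter (fun g => (pvBucketsB posts).contains g) :=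
    List.filter_congr (fun g _ => hcon g)
  have hOGA : pvOrderedGroupsA group_order (PySem.Set.ofList (posts.map pvGroup))
      = group_order.filter (fun g => (pvBucketsB posts).contains g)
        ++ PySem.List.sorted
            (PySem.Set.diff (PySem.Set.ofList (pvBucketsB posts).keys)
              (PySem.Set.ofList (group_order.filter (fun g => (pvBucketsB posts).contains g))))
            (fun x => x) := by
    unfold pvOrderedGroupsA
    rw [hfil, pv_keysB, PySem.Set.ofList_ofList]
  set og := group_order.filter (fun g => (pvBucketsB posts).contains g)
    ++ PySem.List.sorted
        (PySem.Set.diff (PySem.Set.ofList (pvBucketsB posts).keys)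
          (PySem.Set.ofList (group_order.filter (fun g => (pvBucketsB posts).contains g))))
        (fun x => x) with hog
  have hB : balanced_discovery_order_py_alt posts group_order
      = pvLoopB (posts.length + og.length + 1) (pvStreamsOf (pvBucketsB posts)) og [] := rfl
  rw [hA, hOGA, hB]
  have hAC : pvWhileA (posts.length + 1) og (pvBucketsB posts)
      = pvRoundsC (posts.length + 1) (pvStreamsOf (pvBucketsB posts)) og :=
    pv_whileA_roundsC (posts.length + 1) og og (pvBucketsB posts) (pvStreamsOf (pvBucketsB posts))
      (pv_sim_streamsOf _) (pvRel_refl _ og)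
  have hM := pvM_init_le posts og
  have hD := pvD_init_le posts og
  have hBC : pvLoopB (posts.length + og.length + 1) (pvStreamsOf (pvBucketsB posts)) og []
      = pvRoundsC (posts.length + 1) (pvStreamsOf (pvBucketsB posts)) og :=
    pvLoopB_roundsC (posts.length + 1) (posts.length + og.length + 1) _ og (by omega) (by omega)
  rw [hAC, hBC]
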